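-- pv_equiv track=rewrite | github.com/HomogeneousTools/ZeroLocus64 | python/src/zerolocus64/__init__.py | _summand_width
-- ===== SOURCE A (Python) =====
-- def _summand_width(total_dynkin_rank: int, base: int) -> int:
--     if base < 2:
--         raise ValueError("bundle base must be at least 2")
--     width = 1
--     capacity = 62
--     while capacity < base**total_dynkin_rank:
--         width += 1
--         capacity *= 62
--     return width
-- ===== SOURCE B (Python) =====
-- def _summand_width(total_dynkin_rank: int, base: int) -> int:
--     if base < 2:
--         raise ValueError("bundle base must be at least 2")
--     if total_dynkin_rank <= 0:
--         return 1
--     target = base ** total_dynkin_rank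
--     # exponential search for an upper bound, then bisect for the least width
--     hi = 1
--     while 62 ** hi < target:
--         hi *= 2
--     lo = 1
--     while lo < hi:
--         mid = (lo + hi) // 2
--         if 62 ** mid < target:
--             lo = mid + 1
--         else:
--             hi = mid
--     return lo
-- ===== Notes on version B (the rewrite author's own statement) =====
-- stated objective: faster
-- what changed: Replaces the linear multiply-and-count loop with an exponential search for an upper bound followed by binary search on the smallest width with 62**width >= base**total_dynkin_rank.
import Mathlib
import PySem

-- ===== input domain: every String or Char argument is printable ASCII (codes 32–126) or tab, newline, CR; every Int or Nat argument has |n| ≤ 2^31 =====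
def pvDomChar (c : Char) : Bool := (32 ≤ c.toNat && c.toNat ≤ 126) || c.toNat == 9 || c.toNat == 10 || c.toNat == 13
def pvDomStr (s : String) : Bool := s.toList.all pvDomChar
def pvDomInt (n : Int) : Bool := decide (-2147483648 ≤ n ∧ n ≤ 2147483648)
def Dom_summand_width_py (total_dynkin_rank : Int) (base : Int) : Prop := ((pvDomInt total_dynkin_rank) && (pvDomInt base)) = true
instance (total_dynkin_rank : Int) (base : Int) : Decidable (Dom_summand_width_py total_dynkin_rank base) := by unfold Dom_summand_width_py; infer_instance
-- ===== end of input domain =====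

-- B replaces A's linear multiply-and-count loop by exponential search + binary search
-- on the least width with 62^width >= base^rank (objective: faster, measured).


-- ===== PORT A =====
-- A's loop: while capacity < base**total_dynkin_rank: width += 1; capacity *= 62.
-- The positivity hypothesis hc (capacity is always a positive power of 62) is used
-- only for termination.
def summand_width_loop (target : Int) (width : Int) (capacity : Int) (hc : 0 < capacity) :
    Int :=
  if capacity < target then
    summand_width_loop target (width + 1) (capacity * 62) (by positivity)
  else width
termination_by (target - capacity).toNat
decreasing_by
  have : capacity < capacity * 62 := by omega
  omega

def summand_width_py (total_dynkin_rank : Int) (base : Int) : Int :=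
  if base < 2 then 0  -- Python raises ValueError here; excluded by Pre_
  else if total_dynkin_rank < 0 then
    -- Python's base**total_dynkin_rank is then a float in [0,1) (base ≥ 2), so the
    -- loop condition `capacity < base**rank` is false at capacity = 62 and A returns 1.
    1
  else summand_width_loop (base ^ total_dynkin_rank.toNat) 1 62 (by norm_num)

-- ===== PORT B =====
-- exponential search: double hi until 62^hi >= target (hhi only for termination)
def alt_double (target : Int) (hi : Nat) (hhi : 0 < hi) : Nat :=
  if (62 : Int) ^ hi < target then alt_double target (hi * 2) (by omega) else hi
termination_by (target - 62 ^ hi).toNat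
decreasing_by
  have h1 : (62 : Int) ^ hi < 62 ^ (hi * 2) := by
    apply pow_lt_pow_right₀ (by norm_num) (by omega)
  omega

-- binary search for the least w in [lo, hi] with 62^w >= target
def alt_bisect (target : Int) (lo hi : Nat) : Nat :=
  if _h : lo < hi then
    let mid := (lo + hi) / 2
    if (62 : Int) ^ mid < target then alt_bisect target (mid + 1) hi
    else alt_bisect target lo mid
  else lo
termination_by hi - lo
decreasing_by all_goals omega

def summand_width_py_alt (total_dynkin_rank : Int) (base : Int) : Int :=
  if base < 2 then 0  -- Python raises ValueError here; excluded by Pre_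
  else if total_dynkin_rank ≤ 0 then 1
  else
    let target := base ^ total_dynkin_rank.toNat
    let hi := alt_double target 1 (by omega)
    ((alt_bisect target 1 hi : Nat) : Int)

-- ===== PRECONDITION & SPEC =====
-- Pre_ excludes exactly base < 2, where A raises ValueError.
def Pre_summand_width_py (total_dynkin_rank : Int) (base : Int) : Prop := 2 ≤ base
instance (total_dynkin_rank : Int) (base : Int) : Decidable (Pre_summand_width_py total_dynkin_rank base) := by unfold Pre_summand_width_py; infer_instance
def pvWitness_summand_width_py : Int × Int := (3, 5)

def Spec_summand_width_py (total_dynkin_rank : Int) (base : Int) (out : Int) : Prop := out = summand_width_py_alt total_dynkin_rank base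
instance (total_dynkin_rank : Int) (base : Int) (out : Int) : Decidable (Spec_summand_width_py total_dynkin_rank base out) := by unfold Spec_summand_width_py; infer_instance

-- ===== CLAIM (what is proved, stated in full; the proofs are below) =====
def Claim_equal_summand_width_py : Prop := ∀ (total_dynkin_rank : Int) (base : Int), Dom_summand_width_py total_dynkin_rank base → Pre_summand_width_py total_dynkin_rank base → Spec_summand_width_py total_dynkin_rank base (summand_width_py total_dynkin_rank base)

-- ===== LEMMAS AND PROOFS =====

-- "w is the least width ≥ 1 with 62^w ≥ t"
def GoodWidth (t : Int) (w : Nat) : Prop :=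
  1 ≤ w ∧ t ≤ (62 : Int) ^ w ∧ ∀ v : Nat, 1 ≤ v → v < w → (62 : Int) ^ v < t

theorem pow62_mono {a b : Nat} (h : a ≤ b) : (62 : Int) ^ a ≤ 62 ^ b :=
  pow_le_pow_right₀ (by norm_num) h

-- A's loop, started at width k with capacity 62^k, returns the least good width w
theorem summand_width_loop_eq (t : Int) (w : Nat) (hw : GoodWidth t w) :
    ∀ d k : Nat, ∀ (c : Int) (hc : 0 < c), c = (62 : Int) ^ k → k = w - d → 1 ≤ k → k ≤ w →
      summand_width_loop t (k : Int) c hc = (w : Int) := by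
  intro d
  induction d with
  | zero =>
      intro k c hcpos hck hkd hk1 hkw
      have hkw2 : k = w := by omega
      subst hkw2; subst hck
      rw [summand_width_loop]
      have hnot : ¬ (62 : Int) ^ k < t := not_lt.2 hw.2.1
      simp [hnot]
  | succ n ih =>
      intro k c hc hck hk h1 h2
      rw [summand_width_loop]
      by_cases hlt : c < t
      · simp only [hlt, if_true]
        have hkw : k < w := by
          rcases Nat.lt_or_ge k w with h | h
          · exact h
          · have : k = w := by omega
            subst this; subst hck
            exact absurd hw.2.1 (by omega)
        have hcast : ((k : Int) + 1) = ((k + 1 : Nat) : Int) := by push_cast; ring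
        rw [hcast]
        exact ih (k + 1) (c * 62) (by positivity)
          (by rw [hck]; ring) (by omega) (by omega) (by omega)
      · simp only [hlt, if_false]
        have hkw : k = w := by
          rcases Nat.lt_or_ge k w with h | h
          · subst hck; exact absurd (hw.2.2 k h1 h) hlt
          · omega
        exact_mod_cast congrArg (Nat.cast : Nat → Int) hkw

-- doubling loop: result is ≥ 1 and 62^result ≥ t
theorem alt_double_good (t : Int) :
    ∀ n h : Nat, ∀ hh : 0 < h, (t - 62 ^ h).toNat ≤ n →
      1 ≤ alt_double t h hh ∧ t ≤ (62 : Int) ^ (alt_double t h hh) := by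
  intro n
  induction n with
  | zero =>
      intro h hh hm
      rw [alt_double]
      have hnot : ¬ (62 : Int) ^ h < t := by omega
      simp only [hnot, if_false]
      exact ⟨hh, by omega⟩
  | succ n ih =>
      intro h hh hm
      rw [alt_double]
      by_cases hlt : (62 : Int) ^ h < t
      · simp only [hlt, if_true]
        have hstep : (62 : Int) ^ h < 62 ^ (h * 2) :=
          pow_lt_pow_right₀ (by norm_num) (by omega)
        exact ih (h * 2) (by omega) (by omega)
      · simp only [hlt, if_false]
        exact ⟨hh, by omega⟩

-- binary search returns the least good width when the invariants hold
theorem alt_bisect_good (t : Int) :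
    ∀ n lo hi : Nat, hi - lo ≤ n → 1 ≤ lo → lo ≤ hi →
      (∀ v : Nat, 1 ≤ v → v < lo → (62 : Int) ^ v < t) → t ≤ (62 : Int) ^ hi →
      GoodWidth t (alt_bisect t lo hi) := by
  intro n
  induction n with
  | zero =>
      intro lo hi hm h1 hle hinv hcap
      have : lo = hi := by omega
      subst this
      rw [alt_bisect]
      simp only [lt_irrefl, dif_neg, not_false_iff]
      exact ⟨h1, hcap, hinv⟩
  | succ n ih =>
      intro lo hi hm h1 hle hinv hcap
      rw [alt_bisect]
      by_cases hlh : lo < hi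
      · simp only [dif_pos hlh]
        by_cases hmid : (62 : Int) ^ ((lo + hi) / 2) < t
        · simp only [hmid, if_true]
          refine ih ((lo + hi) / 2 + 1) hi (by omega) (by omega) (by omega) ?_ hcap
          intro v hv1 hv2
          rcases Nat.lt_or_ge v lo with h | h
          · exact hinv v hv1 h
          · exact lt_of_le_of_lt (pow62_mono (by omega)) hmid
        · simp only [hmid, if_false]
          exact ih lo ((lo + hi) / 2) (by omega) h1 (by omega) hinv (by omega)
      · simp only [dif_neg hlh]
        have hlo : lo = hi := by omega
        subst hlo
        exact ⟨h1, hcap, hinv⟩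

-- ===== VERDICT (by name: the statement is the Claim_ definition above) =====
theorem summand_width_py_spec : Claim_equal_summand_width_py := by
  intro r b _ hpre
  unfold Spec_summand_width_py summand_width_py summand_width_py_alt
  have hb2 : ¬ b < 2 := not_lt.2 hpre
  simp only [hb2, if_false]
  by_cases hr : r < 0
  · simp only [hr, if_true, (by omega : r ≤ 0), if_true]
  · simp only [hr, if_false]
    by_cases hr0 : r ≤ 0
    · simp only [hr0, if_true]
      have : r.toNat = 0 := by omega
      rw [this]
      rw [summand_width_loop]
      simp
    · simp only [hr0, if_false]
      set t := b ^ r.toNat with ht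
      have hd := alt_double_good t (t - 62 ^ 1).toNat 1 (by omega) (le_refl _)
      set hi := alt_double t 1 (by omega) with hhi
      have hg := alt_bisect_good t (hi - 1) 1 hi (le_refl _) (le_refl _) hd.1
        (by intro v h1 h2; omega) hd.2
      set w := alt_bisect t 1 hi with hww
      have hw1 : 1 ≤ w := hg.1
      have := summand_width_loop_eq t w hg (w - 1) 1 62 (by norm_num)
        (by norm_num) (by omega) (by omega) hg.1
      simpa using this
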